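-- pv_equiv track=rewrite | github.com/Aerysaint/Paddy | Challenge 1B/chunker.py | _is_main_section_heading
-- ===== SOURCE A (Python) =====
-- def _is_main_section_heading(heading_text: str, text_content: str) -> bool:
--     """
--     Determine if a heading represents a main section that should start a new aggregated chunk.
--
--     Args:
--         heading_text: The heading text
--         text_content: The content text
--
--     Returns:
--         True if this should start a new section
--     """
--     # If heading and content are the same and it's substantial, it's likely a main heading
--     if heading_text == text_content and len(heading_text.strip()) > 10:
--         return True
--
--     # Look for common main section patterns
--     main_section_keywords = [
--         'activities', 'adventures', 'experiences', 'attractions', 'things to do',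
--         'restaurants', 'hotels', 'accommodation', 'dining', 'cuisine', 'food',
--         'nightlife', 'entertainment', 'shopping', 'markets', 'culture', 'history',
--         'museums', 'art', 'festivals', 'events', 'transportation', 'travel tips',
--         'best time', 'weather', 'climate', 'packing', 'tips and tricks',
--         'outdoor', 'sports', 'hiking', 'beaches', 'coastal', 'water sports',
--         'wine', 'vineyards', 'cooking', 'classes', 'tours', 'wellness', 'spa'
--     ]
--
--     heading_lower = heading_text.lower()
--     for keyword in main_section_keywords:
--         if keyword in heading_lower:
--             return True
--
--     return False
-- ===== SOURCE B (Python) =====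
-- _MAIN_SECTION_KEYWORDS = (
--     'activities', 'adventures', 'experiences', 'attractions', 'things to do',
--     'restaurants', 'hotels', 'accommodation', 'dining', 'cuisine', 'food',
--     'nightlife', 'entertainment', 'shopping', 'markets', 'culture', 'history',
--     'museums', 'art', 'festivals', 'events', 'transportation', 'travel tips',
--     'best time', 'weather', 'climate', 'packing', 'tips and tricks',
--     'outdoor', 'sports', 'hiking', 'beaches', 'coastal', 'water sports',
--     'wine', 'vineyards', 'cooking', 'classes', 'tours', 'wellness', 'spa'
-- )
--
--
-- def _is_main_section_heading(heading_text: str, text_content: str) -> bool: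
--     if heading_text == text_content and len(heading_text.strip()) > 10:
--         return True
--     heading_lower = heading_text.lower()
--     # single left-to-right scan: at each position, test whether any keyword starts there
--     for i in range(len(heading_lower)):
--         if any(heading_lower.startswith(kw, i) for kw in _MAIN_SECTION_KEYWORDS):
--             return True
--     return False
-- ===== Notes on version B (the rewrite author's own statement) =====
-- stated objective: alternative
-- what changed: Replaces the keyword-major loop (one full substring scan of the heading per keyword) with a single position-major left-to-right scan of the lowered heading that tests at each position whether any keyword starts there.
import Mathlib
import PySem

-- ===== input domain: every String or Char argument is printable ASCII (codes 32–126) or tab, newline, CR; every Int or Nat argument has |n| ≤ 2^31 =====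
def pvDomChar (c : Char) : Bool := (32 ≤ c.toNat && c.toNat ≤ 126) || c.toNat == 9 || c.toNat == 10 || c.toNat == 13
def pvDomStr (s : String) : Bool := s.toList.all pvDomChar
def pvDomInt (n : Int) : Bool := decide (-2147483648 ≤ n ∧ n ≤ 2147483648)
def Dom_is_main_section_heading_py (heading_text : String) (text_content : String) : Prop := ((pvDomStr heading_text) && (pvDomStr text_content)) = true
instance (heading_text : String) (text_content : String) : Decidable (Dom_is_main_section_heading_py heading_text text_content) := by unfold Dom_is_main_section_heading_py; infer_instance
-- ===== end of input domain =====

-- B replaces A's keyword-major loop by a single position-major scan of the lowered heading (alternative decomposition, same result).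

def pvKeywords : List String :=
  ["activities", "adventures", "experiences", "attractions", "things to do",
   "restaurants", "hotels", "accommodation", "dining", "cuisine", "food",
   "nightlife", "entertainment", "shopping", "markets", "culture", "history",
   "museums", "art", "festivals", "events", "transportation", "travel tips",
   "best time", "weather", "climate", "packing", "tips and tricks",
   "outdoor", "sports", "hiking", "beaches", "coastal", "water sports",
   "wine", "vineyards", "cooking", "classes", "tours", "wellness", "spa"]

-- ===== PORT A =====
-- A's for-loop over the keyword list with early return
def pvLoopA : List String → String → Bool
  | [], _ => false
  | k :: ks, hl => if PySem.Str.isIn k hl then true else pvLoopA ks hl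

def is_main_section_heading_py (heading_text : String) (text_content : String) : Bool :=
  if heading_text == text_content && decide (10 < PySem.Str.len (PySem.Str.strip heading_text)) then
    true
  else
    pvLoopA pvKeywords (PySem.Str.lower heading_text)

-- ===== PORT B =====
-- B's scan over positions of the lowered heading; at each position test every keyword
def pvScanB (kws : List (List Char)) : List Char → Bool
  | [] => false
  | c :: rest =>
      if kws.any (fun kw => PySem.Chars.startswith (c :: rest) kw) then true
      else pvScanB kws rest

def is_main_section_heading_py_alt (heading_text : String) (text_content : String) : Bool :=
  if heading_text == text_content && decide (10 < PySem.Str.len (PySem.Str.strip heading_text)) then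
    true
  else
    pvScanB (pvKeywords.map String.toList) (PySem.Str.lower heading_text).toList

-- ===== PRECONDITION & SPEC =====
def Spec_is_main_section_heading_py (heading_text : String) (text_content : String) (out : Bool) : Prop := out = is_main_section_heading_py_alt heading_text text_content
instance (heading_text : String) (text_content : String) (out : Bool) : Decidable (Spec_is_main_section_heading_py heading_text text_content out) := by unfold Spec_is_main_section_heading_py; infer_instance

-- ===== CLAIM (what is proved, stated in full; the proofs are below) =====
def Claim_equal_is_main_section_heading_py : Prop := ∀ (heading_text : String) (text_content : String), Dom_is_main_section_heading_py heading_text text_content → Spec_is_main_section_heading_py heading_text text_content (is_main_section_heading_py heading_text text_content)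

-- ===== LEMMAS AND PROOFS =====

lemma pvLoopA_eq_true_iff (kws : List String) (hl : String) :
    pvLoopA kws hl = true ↔ ∃ kw ∈ kws, PySem.Str.isIn kw hl = true := by
  induction kws with
  | nil => simp [pvLoopA]
  | cons k ks ih =>
      simp only [pvLoopA]
      split_ifs with h
      · exact iff_of_true rfl ⟨k, List.mem_cons_self, h⟩
      · rw [ih]
        constructor
        · rintro ⟨kw, hm, hi⟩
          exact ⟨kw, List.mem_cons_of_mem _ hm, hi⟩
        · rintro ⟨kw, hm, hi⟩
          rcases List.mem_cons.mp hm with rfl | hm'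
          · exact absurd hi h
          · exact ⟨kw, hm', hi⟩

lemma pvScanB_eq_true_iff (kws : List (List Char)) (l : List Char) :
    pvScanB kws l = true ↔ ∃ j, j < l.length ∧ ∃ kw ∈ kws, kw <+: l.drop j := by
  induction l with
  | nil => simp [pvScanB]
  | cons c rest ih =>
      simp only [pvScanB]
      split_ifs with h
      · simp only [true_iff]
        rcases List.any_eq_true.mp h with ⟨kw, hmem, hsw⟩
        exact ⟨0, by simp, kw, hmem, (PySem.Chars.startswith_iff _ _).mp hsw⟩
      · rw [ih]
        constructor
        · rintro ⟨j, hj, kw, hmem, hpre⟩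
          exact ⟨j + 1, by simpa using Nat.succ_lt_succ hj, kw, hmem, by simpa using hpre⟩
        · rintro ⟨j, hj, kw, hmem, hpre⟩
          cases j with
          | zero =>
              exact absurd (List.any_eq_true.mpr
                ⟨kw, hmem, (PySem.Chars.startswith_iff _ _).mpr (by simpa using hpre)⟩) h
          | succ j' =>
              exact ⟨j', by simp at hj; omega, kw, hmem, by simpa using hpre⟩

lemma pvKeywords_nonempty : ∀ kw ∈ pvKeywords, kw.toList ≠ [] := by decide

lemma pvLoop_scan_agree (hl : String) :
    pvLoopA pvKeywords hl = pvScanB (pvKeywords.map String.toList) hl.toList := by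
  have : (pvLoopA pvKeywords hl = true) ↔ (pvScanB (pvKeywords.map String.toList) hl.toList = true) := by
    rw [pvLoopA_eq_true_iff, pvScanB_eq_true_iff]
    constructor
    · rintro ⟨kw, hmem, hin⟩
      have hinf : kw.toList <:+: hl.toList := (PySem.Str.isIn_iff_infix _ _).mp hin
      have hchars : PySem.Chars.isIn kw.toList hl.toList = true :=
        (PySem.Chars.isIn_iff_infix _ _).mpr hinf
      rcases (PySem.Chars.exists_prefix_drop_iff_isIn _ _).mpr hchars with ⟨j, hpre⟩
      have hj : j < hl.toList.length := by
        by_contra hge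
        have : hl.toList.drop j = [] := List.drop_eq_nil_of_le (by omega)
        rw [this] at hpre
        exact pvKeywords_nonempty kw hmem (List.prefix_nil.mp hpre)
      exact ⟨j, hj, kw.toList, List.mem_map_of_mem hmem, hpre⟩
    · rintro ⟨j, hj, kwl, hmeml, hpre⟩
      rcases List.mem_map.mp hmeml with ⟨kw, hmem, rfl⟩
      have hchars : PySem.Chars.isIn kw.toList hl.toList = true :=
        (PySem.Chars.exists_prefix_drop_iff_isIn _ _).mp ⟨j, hpre⟩
      exact ⟨kw, hmem, (PySem.Str.isIn_iff_infix _ _).mpr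
        ((PySem.Chars.isIn_iff_infix _ _).mp hchars)⟩
  exact Bool.eq_iff_iff.mpr this

-- ===== VERDICT (by name: the statement is the Claim_ definition above) =====
theorem is_main_section_heading_py_spec : Claim_equal_is_main_section_heading_py := by
  intro h t _
  unfold Spec_is_main_section_heading_py is_main_section_heading_py is_main_section_heading_py_alt
  split_ifs with hg
  · rfl
  · exact pvLoop_scan_agree (PySem.Str.lower h)
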